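-- pv_equiv track=rewrite | github.com/Lucas-Guimaraes/Reddit-Daily-Programmer | Easy Problems/351-360/353easy.py | hamming_seq
-- ===== SOURCE A (Python) =====
-- def hamming_seq(dna):
--     final = []
--     #Loops over each string
--     for d in range(0, len(dna)):
--         distance = 0
--         #Grabs the hamstring distance for every string in the list
--         for x in range(0, len(dna)):
--             distance += hamming_distance(dna[d], dna[x])
--         final.append((distance, dna[d]))
--
--     #Sorts final list, returns the winning sequence
--     final = sorted(final)
--     return final[0][1]
--
-- def hamming_distance(a, b):
--     distance = 0
--     #Checks each letter of the two proposed strings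
--     for i in range(len(a)):
--         if a[i] != b[i]:
--             distance += 1
--     return distance
-- ===== SOURCE B (Python) =====
-- def hamming_seq(dna):
--     n = len(dna)
--     # one character-frequency table per column, built in a single pass over the input
--     counts = []
--     for i in range(len(dna[0])):
--         cnt = {}
--         for s in dna:
--             c = s[i]
--             cnt[c] = cnt.get(c, 0) + 1
--         counts.append(cnt)
--     # total distance of s = sum over columns of (n - #strings sharing s's character)
--     return min((sum(n - counts[i][c] for i, c in enumerate(s)), s) for s in dna)[1]
-- ===== Notes on version B (the rewrite author's own statement) =====
-- stated objective: faster
-- what changed: Replaces the all-pairs distance computation (every string compared character-by-character with every other) by per-column character frequency tables built in one pass, so each string's total distance is sum over columns of n minus its character's column count, and replaces sort-then-take-first by a single min().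
import Mathlib
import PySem

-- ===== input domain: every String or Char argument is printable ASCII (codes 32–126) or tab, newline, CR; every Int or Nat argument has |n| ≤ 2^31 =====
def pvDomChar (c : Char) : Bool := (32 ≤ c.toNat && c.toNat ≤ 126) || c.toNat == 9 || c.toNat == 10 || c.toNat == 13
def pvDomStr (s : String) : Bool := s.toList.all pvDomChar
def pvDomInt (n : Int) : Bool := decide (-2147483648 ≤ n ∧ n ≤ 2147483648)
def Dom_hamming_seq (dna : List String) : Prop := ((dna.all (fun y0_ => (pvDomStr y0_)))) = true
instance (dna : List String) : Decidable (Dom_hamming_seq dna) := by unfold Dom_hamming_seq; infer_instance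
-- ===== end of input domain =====

-- B replaces A's all-pairs character comparison by per-column frequency tables (distance of s =
-- sum over columns of n minus the column count of s's character) and min() instead of sort-then-head.

-- ===== PORT A =====
-- exact wherever b is at least as long as a (guaranteed under Pre_, which demands equal lengths);
-- Python raises IndexError at b[i] when len(b) < len(a), which Pre_ excludes.
def hamming_distance (a b : String) : Int :=
  (PySem.List.pyRange 0 (PySem.Str.len a) 1).foldl
    (fun distance i =>
      if PySem.Str.pyGet? a i ≠ PySem.Str.pyGet? b i then distance + 1 else distance) 0

def hamming_seq (dna : List String) : String :=
  let final : List (Int × String) :=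
    (PySem.List.pyRange 0 (PySem.List.len dna) 1).foldl
      (fun acc d =>
        acc ++ [((PySem.List.pyRange 0 (PySem.List.len dna) 1).foldl
                   (fun distance x =>
                     distance + hamming_distance (PySem.List.pyGetD dna d "")
                                                 (PySem.List.pyGetD dna x "")) 0,
                 PySem.List.pyGetD dna d "")]) []
  let final' := PySem.List.sorted2 final (fun p => p.1) (fun p => p.2)
  (PySem.List.pyGetD final' 0 (0, "")).2

-- ===== PORT B =====
def hamming_seq_alt (dna : List String) : String :=
  let n : Int := PySem.List.len dna
  let counts : List (PySem.Dict Char Int) :=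
    (PySem.List.pyRange 0 (PySem.Str.len (PySem.List.pyGetD dna 0 "")) 1).foldl
      (fun acc i =>
        acc ++ [dna.foldl
                  (fun cnt s =>
                    cnt.insert (PySem.List.pyGetD s.toList i ' ')
                               (cnt.getD (PySem.List.pyGetD s.toList i ' ') 0 + 1))
                  PySem.Dict.empty]) []
  ((PySem.List.min2? (dna.map (fun s =>
      ((PySem.List.enumerate s.toList 0).foldl
         (fun acc p =>
           acc + (n - (PySem.List.pyGetD counts p.1 PySem.Dict.empty).getD p.2 0)) 0,
       s)))
     (fun p => p.1) (fun p => p.2)).getD (0, "")).2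

-- ===== PRECONDITION & SPEC =====
-- Pre_ excludes exactly the inputs where A raises: the empty list (final[0] → IndexError) and
-- lists whose strings do not all have the same length (hamming_distance indexes b[i] → IndexError).
def Pre_hamming_seq (dna : List String) : Prop :=
  dna ≠ [] ∧ ∀ s ∈ dna, s.toList.length = ((dna.headD "").toList).length
instance (dna : List String) : Decidable (Pre_hamming_seq dna) := by
  unfold Pre_hamming_seq; infer_instance

def pvWitness_hamming_seq : List String := ["ACT", "GAT", "AGT"]

def Spec_hamming_seq (dna : List String) (out : String) : Prop := out = hamming_seq_alt dna
instance (dna : List String) (out : String) : Decidable (Spec_hamming_seq dna out) := by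
  unfold Spec_hamming_seq; infer_instance

-- ===== CLAIM (what is proved, stated in full; the proofs are below) =====
def Claim_equal_hamming_seq : Prop :=
  ∀ (dna : List String), Dom_hamming_seq dna → Pre_hamming_seq dna →
    Spec_hamming_seq dna (hamming_seq dna)

-- ===== LEMMAS AND PROOFS =====

-- Python's tuple comparison (d, s) < (d', s') packaged as one linear-order key
def pvKey (p : Int × String) : Int ×ₗ String := toLex p

theorem pv_before_bool (a b : Int × String) :
    (decide (a.1 < b.1) || (!decide (b.1 < a.1) && decide (a.2 < b.2)))
      = decide (pvKey a < pvKey b) := by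
  by_cases h1 : a.1 < b.1
  · simp [pvKey, Prod.Lex.lt_iff, h1]
  · by_cases h2 : b.1 < a.1
    · simp [pvKey, Prod.Lex.lt_iff, h1, h2, h2.ne']
    · have heq : a.1 = b.1 := le_antisymm (not_lt.mp h2) (not_lt.mp h1)
      simp [pvKey, Prod.Lex.lt_iff, heq]

theorem pv_sorted2_eq (l : List (Int × String)) :
    PySem.List.sorted2 l (fun p => p.1) (fun p => p.2) = PySem.List.sorted l pvKey := by
  have hb : (fun (a b : Int × String) =>
      decide (a.1 < b.1) || (!decide (b.1 < a.1) && decide (a.2 < b.2)))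
      = (fun a b => decide (pvKey a < pvKey b)) := by
    funext a b; exact pv_before_bool a b
  calc PySem.List.sorted2 l (fun p => p.1) (fun p => p.2)
      = l.foldl (fun acc x => PySem.List.insertBy
          (fun a b => decide (a.1 < b.1) || (!decide (b.1 < a.1) && decide (a.2 < b.2))) x acc) [] := rfl
    _ = l.foldl (fun acc x => PySem.List.insertBy
          (fun a b => decide (pvKey a < pvKey b)) x acc) [] := by rw [hb]
    _ = PySem.List.sorted l pvKey := (PySem.List.sorted_eq_foldl_insertBy l pvKey).symm

theorem pv_min2_eq (l : List (Int × String)) :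
    PySem.List.min2? l (fun p => p.1) (fun p => p.2) = PySem.List.min? l pvKey := by
  unfold PySem.List.min2? PySem.List.min?
  congr 1
  funext acc x
  cases acc with
  | none => rfl
  | some m =>
    show (if (decide (x.1 < m.1) || (!decide (m.1 < x.1) && decide (x.2 < m.2))) = true
            then some x else some m)
        = (if pvKey x < pvKey m then some x else some m)
    rw [pv_before_bool]; simp

-- head of the Python sort = Python's min (the key is injective, so ties are harmless)
theorem pv_sel (l : List (Int × String)) (dflt : Int × String) :
    PySem.List.pyGetD (PySem.List.sorted2 l (fun p => p.1) (fun p => p.2)) 0 dflt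
      = ((PySem.List.min2? l (fun p => p.1) (fun p => p.2)).getD dflt) := by
  rw [pv_sorted2_eq, pv_min2_eq]
  cases hl : PySem.List.sorted l pvKey with
  | nil =>
    have hnil : l = [] := (PySem.List.sorted_eq_nil_iff l pvKey false).mp hl
    subst hnil; rfl
  | cons m t =>
    have hml : m ∈ l := (PySem.List.sorted_perm l pvKey false).subset (hl ▸ List.mem_cons_self)
    have hmin := PySem.List.key_head_sorted_le l pvKey hl
    cases hm' : PySem.List.min? l pvKey with
    | none =>
      have hnil : l = [] := (PySem.List.min?_eq_none_iff l pvKey).mp hm'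
      subst hnil
      rw [show PySem.List.sorted ([] : List (Int × String)) pvKey = [] from rfl] at hl
      cases hl
    | some m' =>
      have h1 : pvKey m ≤ pvKey m' := hmin m' (PySem.List.min?_mem hm')
      have h2 : pvKey m' ≤ pvKey m := PySem.List.min?_isMin hm' m hml
      have : m' = m := toLex.injective (le_antisymm h2 h1)
      subst this
      simp [PySem.List.pyGetD_zero_cons]

-- 'for d in range(len(xs)): … g(xs[d]) …' is a map over xs
theorem pv_map_pyGetD_comp {α β : Type} (xs : List α) (d : α) (g : α → β) :
    (PySem.List.pyRange 0 (PySem.List.len xs) 1).map (fun j => g (PySem.List.pyGetD xs j d))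
      = xs.map g := by
  rw [show (fun j => g (PySem.List.pyGetD xs j d))
        = g ∘ (fun j => PySem.List.pyGetD xs j d) from rfl,
      ← List.map_map, PySem.List.map_pyGetD_pyRange_zero]

theorem pv_sum_swap {α β : Type} (l₁ : List α) (l₂ : List β) (f : α → β → Int) :
    (l₁.map (fun a => (l₂.map (fun b => f a b)).sum)).sum
      = (l₂.map (fun b => (l₁.map (fun a => f a b)).sum)).sum := by
  induction l₁ with
  | nil => simp
  | cons a l ih => simp [ih]

theorem pv_sum_ind_eq (c : Char) (cs : List Char) :
    (cs.map (fun x => if c = x then (0 : Int) else 1)).sum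
      = (cs.length : Int) - (cs.count c : Int) := by
  induction cs with
  | nil => simp
  | cons x t ih =>
    have hle := List.count_le_length (a := c) (l := t)
    by_cases h : c = x
    · subst h
      simp only [List.map_cons, List.sum_cons, List.count_cons_self,
        List.length_cons]
      push_cast
      omega
    · simp only [List.map_cons, List.sum_cons, if_neg h, List.length_cons,
        List.count_cons_of_ne (fun hxc => h hxc.symm)]
      push_cast
      omega

-- the column-frequency loop of B counts occurrences of key(·) over the list
theorem pv_colcount (l : List String) (key : String → Char) (v : Char) (d : PySem.Dict Char Int) :
    (l.foldl (fun cnt s => cnt.insert (key s) (cnt.getD (key s) 0 + 1)) d).getD v 0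
      = d.getD v 0 + ((l.map key).count v : Int) := by
  have h1 : l.foldl (fun cnt s => cnt.insert (key s) (cnt.getD (key s) 0 + 1)) d
      = (l.map key).foldl (fun cnt c => cnt.insert c (cnt.getD c 0 + 1)) d :=
    (List.foldl_map (f := key)
      (g := fun (cnt : PySem.Dict Char Int) c => cnt.insert c (cnt.getD c 0 + 1))
      (l := l) (init := d)).symm
  rw [h1, PySem.Dict.getD_foldl_insert_add_one]

-- A's character loop as an explicit 0/1 column sum (both strings of length L0)
theorem pv_hd (L0 : Nat) (s t : String) (hs : s.toList.length = L0) (ht : t.toList.length = L0) :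
    hamming_distance s t
      = ((List.range L0).map (fun k =>
          if s.toList.getD k ' ' = t.toList.getD k ' ' then (0 : Int) else 1)).sum := by
  unfold hamming_distance
  rw [PySem.List.foldl_ite_add_one]
  have hlen : PySem.Str.len s = (L0 : Int) := by
    simp [PySem.Str.len_eq, hs]
  rw [hlen, PySem.List.pyRange_zero_nat, List.countP_map, zero_add]
  rw [← PySem.List.sum_map_ite_one_zero
        ((fun i => decide (PySem.Str.pyGet? s i ≠ PySem.Str.pyGet? t i)) ∘ (fun k : Nat => (k : Int)))
        (List.range L0)]
  refine congrArg List.sum (List.map_congr_left ?_)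
  intro k hk
  have hk' := List.mem_range.mp hk
  simp only [Function.comp]
  have h1 : PySem.Str.pyGet? s ((k : Nat) : Int) = some (s.toList.getD k ' ') := by
    rw [PySem.Str.pyGet?_natCast, List.getElem?_eq_getElem (hs ▸ hk'),
        List.getD_eq_getElem _ _ (hs ▸ hk')]
  have h2 : PySem.Str.pyGet? t ((k : Nat) : Int) = some (t.toList.getD k ' ') := by
    rw [PySem.Str.pyGet?_natCast, List.getElem?_eq_getElem (ht ▸ hk'),
        List.getD_eq_getElem _ _ (ht ▸ hk')]
  simp only [h1, h2]
  by_cases heq : s.toList.getD k ' ' = t.toList.getD k ' ' <;> simp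

-- A's total distance of s = column-count form (everything of length L0)
theorem pv_dist (dna : List String) (L0 : Nat) (hl : ∀ t ∈ dna, t.toList.length = L0)
    (s : String) (hs : s ∈ dna) :
    (dna.map (fun t => hamming_distance s t)).sum
      = ((List.range L0).map (fun k =>
          ((dna.length : Int) -
            ((dna.map (fun t => t.toList.getD k ' ')).count (s.toList.getD k ' ') : Int)))).sum := by
  rw [List.map_congr_left (fun t ht => pv_hd L0 s t (hl s hs) (hl t ht))]
  rw [pv_sum_swap]
  refine congrArg List.sum (List.map_congr_left ?_)
  intro k hk
  rw [show (fun t : String => if s.toList.getD k ' ' = t.toList.getD k ' ' then (0:Int) else 1)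
        = (fun x : Char => if s.toList.getD k ' ' = x then (0:Int) else 1)
            ∘ (fun t : String => t.toList.getD k ' ') from rfl,
      ← List.map_map, pv_sum_ind_eq]
  simp

-- B's per-string distance loop = the column-count sum over range L0
theorem pv_distB (dna : List String) (L0 : Nat) (s : String) (hs : s.toList.length = L0) :
    (PySem.List.enumerate s.toList 0).foldl
      (fun acc p =>
        acc + (PySem.List.len dna -
          (PySem.List.pyGetD
             ((PySem.List.pyRange 0 (L0 : Int) 1).foldl
               (fun acc2 i2 => acc2 ++
                 [dna.foldl (fun cnt s2 =>
                    cnt.insert (PySem.List.pyGetD s2.toList i2 ' ')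
                      (cnt.getD (PySem.List.pyGetD s2.toList i2 ' ') 0 + 1)) PySem.Dict.empty])
               []) p.1 PySem.Dict.empty).getD p.2 0)) 0
      = ((List.range L0).map (fun k =>
          ((dna.length : Int) -
            ((dna.map (fun t => t.toList.getD k ' ')).count (s.toList.getD k ' ') : Int)))).sum := by
  rw [PySem.List.enumerate_eq_map_pyRange (d := ' '), List.foldl_map]
  simp only [PySem.List.foldl_append_singleton_eq_map, List.nil_append,
    PySem.List.foldl_add, zero_add, PySem.List.len_eq, hs]
  have h1 : ∀ i ∈ PySem.List.pyRange 0 (L0 : Int) 1,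
      ((dna.length : Int) -
        (PySem.List.pyGetD ((PySem.List.pyRange 0 (L0 : Int) 1).map (fun i2 =>
            dna.foldl (fun cnt s2 =>
              cnt.insert (PySem.List.pyGetD s2.toList i2 ' ')
                (cnt.getD (PySem.List.pyGetD s2.toList i2 ' ') 0 + 1)) PySem.Dict.empty))
          i PySem.Dict.empty).getD (PySem.List.pyGetD s.toList i ' ') 0)
      = ((dna.length : Int) -
          ((dna.map (fun t => PySem.List.pyGetD t.toList i ' ')).count
            (PySem.List.pyGetD s.toList i ' ') : Int)) := by
    intro i hi
    obtain ⟨h0, hlt⟩ := (PySem.List.mem_pyRange_one).mp hi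
    rw [PySem.List.pyGetD_map_pyRange_of_nonneg _ _ _ _ h0 hlt,
        pv_colcount dna (fun s2 => PySem.List.pyGetD s2.toList i ' ')]
    simp
  rw [List.map_congr_left h1, PySem.List.pyRange_zero_nat, List.map_map]
  refine congrArg List.sum (List.map_congr_left ?_)
  intro k hk
  simp [PySem.List.pyGetD_natCast]

-- A's result, normalised: sort the list of (total distance, string) pairs and take the head
theorem pv_A_norm (dna : List String) :
    hamming_seq dna
      = (PySem.List.pyGetD
          (PySem.List.sorted2
            (dna.map (fun s => ((dna.map (fun t => hamming_distance s t)).sum, s)))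
            (fun p => p.1) (fun p => p.2)) 0 (0, "")).2 := by
  have hInner : ∀ s' : String,
      (PySem.List.pyRange 0 (PySem.List.len dna) 1).foldl
        (fun distance x => distance + hamming_distance s' (PySem.List.pyGetD dna x "")) 0
        = (dna.map (fun t => hamming_distance s' t)).sum := by
    intro s'
    exact (PySem.List.foldl_pyRange_zero_pyGetD dna ""
        (fun distance t => distance + hamming_distance s' t) 0).trans
      ((PySem.List.foldl_add dna (fun t => hamming_distance s' t) 0).trans (zero_add _))
  have hmap : (PySem.List.pyRange 0 (PySem.List.len dna) 1).map
      (fun d => ((dna.map (fun t => hamming_distance (PySem.List.pyGetD dna d "") t)).sum,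
                 PySem.List.pyGetD dna d ""))
      = dna.map (fun s => ((dna.map (fun t => hamming_distance s t)).sum, s)) :=
    pv_map_pyGetD_comp dna "" (fun s => ((dna.map (fun t => hamming_distance s t)).sum, s))
  unfold hamming_seq
  simp only [PySem.List.foldl_append_singleton_eq_map, List.nil_append, hInner, hmap]

-- ===== VERDICT (by name: the statement is the Claim_ definition above) =====
theorem hamming_seq_spec : Claim_equal_hamming_seq := by
  intro dna _ hpre
  unfold Spec_hamming_seq
  obtain ⟨hne, hall⟩ := hpre
  rw [pv_A_norm dna, pv_sel]
  unfold hamming_seq_alt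
  have hhead : PySem.List.pyGetD dna 0 "" = dna.headD "" := by
    rw [PySem.List.pyGetD_zero]
    cases dna with
    | nil => exact absurd rfl hne
    | cons h t => rfl
  have hlen0 : PySem.Str.len (PySem.List.pyGetD dna 0 "")
      = (((dna.headD "").toList.length : Nat) : Int) := by
    simp [hhead, PySem.Str.len_eq]
  simp only [hlen0]
  refine congrArg (fun l : List (Int × String) =>
    ((PySem.List.min2? l (fun p => p.1) (fun p => p.2)).getD ((0 : Int), "")).2) ?_
  apply List.map_congr_left
  intro s hs
  rw [pv_dist dna ((dna.headD "").toList.length) hall s hs]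
  exact congrArg (fun z => (z, s))
    (pv_distB dna ((dna.headD "").toList.length) s (hall s hs)).symm
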